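-- pv_equiv track=rewrite | github.com/topal-team/elf | elf/partitioners/partition.py | get_sources_targets
-- ===== SOURCE A (Python) =====
-- def get_sources_targets(inputs, outputs):
-- 	"""
-- 	:return:
--
-- 	        - ``sources``: a list of lists, containing the indices of the source of each input of each part
-- 	        - ``targets``: a list of lists of lists, containing the indices of each target for each output of each part
--
-- 	:rtype: List[List[int]], List[List[List[int]]]
-- 	"""
-- 	n = len(inputs)
-- 	assert n == len(outputs)
-- 	sources = [[] for _ in range(n)]
-- 	targets = [[] for _ in range(n)]
--
-- 	# Only one source
-- 	def find_source(inp, imax):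
-- 		for i in range(imax):
-- 			if inp in outputs[i]:
-- 				return i
-- 		return None
--
-- 	# Multiple targets
-- 	def find_targets(out, imin):
-- 		tgts = []
-- 		for i in range(imin + 1, n):
-- 			if out in inputs[i]:
-- 				tgts.append(i)
--
-- 		# If no target is found, it means the output is the final output
-- 		if not tgts:
-- 			tgts.append(None)
-- 		return tgts
--
-- 	for i in range(n):
-- 		for inp in inputs[i]:
-- 			src = find_source(inp, i)
-- 			sources[i].append(src)
--
-- 			# If we do that, we get the target indices in the order of who needs them
-- 			# We want them in the order of the actual output
-- 			# if the model does `return x,y,z` we want targets to be [tgt of x, tgt of y, tgt of z] even if z is needed before x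
--
-- 			# Actually, the way we constructed the graph is that the output nodes are ordered from first to last used (see get_inputs_outputs), so that could work ? TODO: check
--
-- 			# targets[src].append(i)
--
-- 		for out in outputs[i]:
-- 			tgts = find_targets(out, i)
-- 			targets[i].append(tgts)
--
-- 	return sources, targets
-- ===== SOURCE B (Python) =====
-- def get_sources_targets(inputs, outputs):
-- 	n = len(inputs)
-- 	assert n == len(outputs)
--
-- 	def index_by_value(parts):
-- 		# value -> ascending list of part indices whose part contains the value
-- 		idx = {}
-- 		for i, part in enumerate(parts):
-- 			for v in dict.fromkeys(part):
-- 				idx.setdefault(v, []).append(i)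
-- 		return idx
--
-- 	producers = index_by_value(outputs)
-- 	consumers = index_by_value(inputs)
--
-- 	sources = []
-- 	targets = []
-- 	for i, part in enumerate(inputs):
-- 		row = []
-- 		for v in part:
-- 			ps = producers.get(v, [])
-- 			row.append(ps[0] if ps and ps[0] < i else None)
-- 		sources.append(row)
-- 		trow = []
-- 		for v in outputs[i]:
-- 			tg = [j for j in consumers.get(v, []) if j > i]
-- 			trow.append(tg if tg else [None])
-- 		targets.append(trow)
-- 	return sources, targets
-- ===== Notes on version B (the rewrite author's own statement) =====
-- stated objective: faster
-- what changed: Replaces the per-element rescan of all earlier/later parts (find_source/find_targets membership loops) by two inverted indexes built once (value -> ascending list of part indices producing/consuming it); each source is the head of the producer list and each target list is a filter of the consumer list.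
import Mathlib
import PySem

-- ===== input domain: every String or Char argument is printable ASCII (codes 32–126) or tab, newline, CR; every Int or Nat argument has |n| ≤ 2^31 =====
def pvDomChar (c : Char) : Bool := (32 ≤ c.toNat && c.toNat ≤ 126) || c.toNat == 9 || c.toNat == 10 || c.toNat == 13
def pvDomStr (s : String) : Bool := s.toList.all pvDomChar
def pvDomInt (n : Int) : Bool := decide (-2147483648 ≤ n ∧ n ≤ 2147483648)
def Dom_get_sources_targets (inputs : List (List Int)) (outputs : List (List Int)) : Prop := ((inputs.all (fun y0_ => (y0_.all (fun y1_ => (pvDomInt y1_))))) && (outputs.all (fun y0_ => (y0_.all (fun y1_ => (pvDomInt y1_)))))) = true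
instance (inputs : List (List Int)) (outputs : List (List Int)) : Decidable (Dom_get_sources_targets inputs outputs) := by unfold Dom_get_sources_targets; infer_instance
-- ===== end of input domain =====

-- B replaces A's per-element rescans of all earlier/later parts by two inverted indexes
-- (value -> ascending list of part indices) built once; objective: faster.

-- ===== PORT A =====
-- find_source: first i < imax with inp in outputs[i], else None
def pvFindSource (outputs : List (List Int)) (inp : Int) (imax : Nat) : Option Int :=
  ((List.range imax).find? (fun i => decide (inp ∈ outputs.getD i []))).map (fun i => (i : Int))

-- find_targets: every i in range(imin+1, n) with out in inputs[i]; [None] if none found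
def pvFindTargets (inputs : List (List Int)) (n : Nat) (out : Int) (imin : Nat) : List (Option Int) :=
  let tgts := ((List.range' (imin+1) (n - (imin+1))).filter
      (fun i => decide (out ∈ inputs.getD i []))).map (fun i => some ((i : Nat) : Int))
  if tgts.isEmpty then [none] else tgts

def get_sources_targets (inputs : List (List Int)) (outputs : List (List Int)) : List (List (Option Int)) × List (List (List (Option Int))) :=
  let n := inputs.length
  ((List.range n).map (fun i => (inputs.getD i []).map (fun inp => pvFindSource outputs inp i)),
   (List.range n).map (fun i => (outputs.getD i []).map (fun out => pvFindTargets inputs n out i)))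

-- ===== PORT B =====
-- index_by_value: value -> ascending list of the indices of the parts containing it
-- ('for i, part in enumerate(parts): for v in dict.fromkeys(part): idx.setdefault(v, []).append(i)')
def pvIndexByValue (parts : List (List Int)) : PySem.Dict Int (List Int) :=
  ((PySem.List.enumerate parts).flatMap
      (fun p => (PySem.List.dedup p.2).map (fun v => (v, p.1)))).foldl
    (fun d q => d.modify q.1 [] (· ++ [q.2])) PySem.Dict.empty

def get_sources_targets_alt (inputs : List (List Int)) (outputs : List (List Int)) : List (List (Option Int)) × List (List (List (Option Int))) :=
  let producers := pvIndexByValue outputs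
  let consumers := pvIndexByValue inputs
  let sources := (PySem.List.enumerate inputs).map (fun p => p.2.map (fun v =>
      match (producers.getD v []).head? with
      | some q => if q < p.1 then some q else none
      | none => none))
  let targets := (PySem.List.enumerate inputs).map (fun p =>
      (PySem.List.pyGetD outputs p.1 []).map (fun v =>
        let tg := (consumers.getD v []).filter (fun j => decide (p.1 < j))
        if tg.isEmpty then [none] else tg.map some))
  (sources, targets)

-- ===== PRECONDITION & SPEC =====
-- A asserts len(inputs) == len(outputs); Pre_ admits exactly the inputs passing that assert.
def Pre_get_sources_targets (inputs : List (List Int)) (outputs : List (List Int)) : Prop :=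
  inputs.length = outputs.length
instance (inputs : List (List Int)) (outputs : List (List Int)) : Decidable (Pre_get_sources_targets inputs outputs) := by unfold Pre_get_sources_targets; infer_instance
def pvWitness_get_sources_targets : List (List Int) × List (List Int) := ([[1], [2]], [[2], [3]])

def Spec_get_sources_targets (inputs : List (List Int)) (outputs : List (List Int)) (out : List (List (Option Int)) × List (List (List (Option Int)))) : Prop := out = get_sources_targets_alt inputs outputs
instance (inputs : List (List Int)) (outputs : List (List Int)) (out : List (List (Option Int)) × List (List (List (Option Int)))) : Decidable (Spec_get_sources_targets inputs outputs out) := by unfold Spec_get_sources_targets; infer_instance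

-- ===== CLAIM (what is proved, stated in full; the proofs are below) =====
def Claim_equal_get_sources_targets : Prop := ∀ (inputs : List (List Int)) (outputs : List (List Int)), Dom_get_sources_targets inputs outputs → Pre_get_sources_targets inputs outputs → Spec_get_sources_targets inputs outputs (get_sources_targets inputs outputs)

-- ===== LEMMAS AND PROOFS =====

-- filtering a duplicate-free list for one element keeps exactly that element
lemma nodup_filter_beq (l : List Int) (a : Int) (h : l.Nodup) : l.filter (· == a) = if a ∈ l then [a] else [] := by
  induction l with
  | nil => simp
  | cons x t ih =>
    simp only [List.nodup_cons] at h
    by_cases hx : x = a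
    · subst hx
      simp [ih h.2, h.1]
    · simp [hx, ih h.2, List.mem_cons, Ne.symm hx]

-- the (value, index) pair stream of pvIndexByValue, restricted to one value, lists
-- exactly the indices of the parts containing it, in order
lemma pvPairs_filter (parts : List (List Int)) (v : Int) (s : Int) :
    ((((PySem.List.enumerate parts s).flatMap (fun p => (PySem.List.dedup p.2).map (fun w => (w, p.1)))).filter (fun q => q.1 == v)).map (·.2))
      = ((List.range parts.length).filter (fun j => decide (v ∈ parts.getD j []))).map (fun (j : Nat) => s + (j:Int)) := by
  induction parts generalizing s with
  | nil => simp [PySem.List.enumerate_nil]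
  | cons part rest ih =>
    rw [PySem.List.enumerate_cons]
    simp only [List.flatMap_cons, List.filter_append, List.map_append, ih (s+1)]
    rw [List.filter_map]
    have : (fun (q : Int × Int) => q.1 == v) ∘ (fun w => (w, s)) = (fun w => w == v) := rfl
    rw [this, nodup_filter_beq _ _ (PySem.List.nodup_dedup part), List.length_cons, List.range_succ_eq_map, List.filter_cons]
    simp only [PySem.List.mem_dedup, List.getD_cons_zero, List.filter_map]
    have h2 : ((fun j => decide (v ∈ (part :: rest).getD j [])) ∘ Nat.succ) = (fun j => decide (v ∈ rest.getD j [])) := by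
      funext j; simp
    rw [h2]
    have hF : ∀ (F : List Nat), F.map (fun (j : Nat) => s + 1 + (j:Int)) = (F.map Nat.succ).map (fun (j : Nat) => s + (j:Int)) := by
      intro F
      rw [List.map_map]
      apply List.map_congr_left
      intro a _
      simp [Function.comp, Nat.succ_eq_add_one]
      ring
    by_cases hv : v ∈ part <;> simp [hv, hF]

-- the inverted index, characterised: idx[v] is the ascending list of part indices containing v
lemma getD_pvIndexByValue (parts : List (List Int)) (v : Int) :
    (pvIndexByValue parts).getD v [] =
      ((List.range parts.length).filter
        (fun j => decide (v ∈ parts.getD j []))).map (fun (j : Nat) => (j : Int)) := by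
  unfold pvIndexByValue
  rw [PySem.Dict.getD_foldl_modify_append, PySem.Dict.getD_empty, pvPairs_filter parts v 0]
  simp

-- sources agree pointwise: A's scan of range(i) = head of the producer list, cut at i
lemma source_eq (outputs : List (List Int)) (v : Int) (i : Nat) (hi : i ≤ outputs.length) :
    pvFindSource outputs v i =
      (match ((pvIndexByValue outputs).getD v []).head? with
       | some q => if q < (i : Int) then some q else none
       | none => none) := by
  rw [getD_pvIndexByValue]
  unfold pvFindSource
  rw [← List.head?_filter]
  have hsplit : List.range outputs.length = List.range i ++ (List.range (outputs.length - i)).map (fun x => i + x) := by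
    rw [← List.range_add, Nat.add_sub_cancel' hi]
  rw [hsplit, List.filter_append, List.map_append, List.head?_append]
  cases hh : ((List.range i).filter (fun j => decide (v ∈ outputs.getD j []))).head? with
  | some j =>
    have hj : j ∈ (List.range i).filter (fun j => decide (v ∈ outputs.getD j [])) := List.mem_of_head? hh
    have hji : j < i := List.mem_range.mp (List.mem_of_mem_filter hj)
    simp only [List.head?_map, hh, Option.map_some]
    simp [hji]
  | none =>
    have hnil : (List.range i).filter (fun j => decide (v ∈ outputs.getD j [])) = [] := by
      cases h' : (List.range i).filter (fun j => decide (v ∈ outputs.getD j [])) with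
      | nil => rfl
      | cons a t => rw [h'] at hh; simp at hh
    rw [hnil]
    simp only [List.map_nil, List.head?_map]
    cases hh2 : (((List.range (outputs.length - i)).map (fun x => i + x)).filter (fun j => decide (v ∈ outputs.getD j []))).head? with
    | none => simp
    | some j =>
      have hj : j ∈ ((List.range (outputs.length - i)).map (fun x => i + x)).filter (fun j => decide (v ∈ outputs.getD j [])) := List.mem_of_head? hh2
      have hj2 := List.mem_of_mem_filter hj
      simp only [List.mem_map] at hj2
      obtain ⟨k, _, hk⟩ := hj2
      have : ¬ ((j : Int) < (i : Int)) := by omega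
      simp [this]

-- targets agree pointwise: A's filtered scan of range(i+1, n) = the consumer list cut after i
lemma target_eq (inputs : List (List Int)) (v : Int) (i : Nat) :
    pvFindTargets inputs inputs.length v i =
      (let tg := ((pvIndexByValue inputs).getD v []).filter (fun j => decide ((i : Int) < j));
       if tg.isEmpty then [none] else tg.map some) := by
  rw [getD_pvIndexByValue]
  unfold pvFindTargets
  have hrange : (List.range inputs.length).filter (fun j => decide (i < j)) = List.range' (i+1) (inputs.length - (i+1)) := by
    by_cases hn : i + 1 ≤ inputs.length
    · rw [← Nat.add_sub_cancel' hn, List.range_add, List.filter_append, Nat.add_sub_cancel_left]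
      have h1 : (List.range (i+1)).filter (fun j => decide (i < j)) = [] := by
        apply List.filter_eq_nil_iff.mpr
        intro a ha
        simp only [List.mem_range] at ha
        simp; omega
      have h2 : ((List.range (inputs.length - (i+1))).map (fun x => i + 1 + x)).filter (fun j => decide (i < j)) = (List.range (inputs.length - (i+1))).map (fun x => i + 1 + x) := by
        apply List.filter_eq_self.mpr
        intro a ha
        simp only [List.mem_map] at ha
        obtain ⟨k, _, hk⟩ := ha
        simp; omega
      rw [h1, h2, List.nil_append, List.range'_eq_map_range]
    · have h0 : inputs.length - (i+1) = 0 := by omega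
      rw [h0]
      apply List.filter_eq_nil_iff.mpr
      intro a ha
      simp only [List.mem_range] at ha
      simp; omega
  have hkey : (((List.range inputs.length).filter (fun j => decide (v ∈ inputs.getD j []))).map (fun (j:Nat) => (j:Int))).filter (fun j => decide ((i:Int) < j)) =
      ((List.range' (i+1) (inputs.length - (i+1))).filter (fun j => decide (v ∈ inputs.getD j []))).map (fun (j:Nat) => (j:Int)) := by
    rw [List.filter_map]
    congr 1
    rw [← hrange, List.filter_filter, List.filter_filter]
    apply List.filter_congr
    intro a _
    simp [Bool.and_comm]
  simp only [hkey]
  simp only [List.isEmpty_iff, List.map_eq_nil_iff]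
  split_ifs with h
  · rfl
  · simp [List.map_map]

-- ===== VERDICT (by name: the statement is the Claim_ definition above) =====
theorem get_sources_targets_spec : Claim_equal_get_sources_targets := by
  intro inputs outputs _ hpre
  have hlen : inputs.length = outputs.length := hpre
  unfold Spec_get_sources_targets get_sources_targets get_sources_targets_alt
  have he : PySem.List.enumerate inputs = (List.range inputs.length).map (fun (k : Nat) => ((k:Int), inputs.getD k [])) := by
    rw [PySem.List.enumerate_eq_map_pyRange (d := [])]
    rw [PySem.List.len_eq, PySem.List.pyRange_zero_nat, List.map_map]
    apply List.map_congr_left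
    intro k _
    simp [PySem.List.pyGetD_natCast]
  rw [he]
  simp only [List.map_map]
  refine Prod.ext ?_ ?_
  · apply List.map_congr_left
    intro k hk
    have hk' : k < inputs.length := List.mem_range.mp hk
    simp only [Function.comp]
    apply List.map_congr_left
    intro v _
    exact source_eq outputs v k (by omega)
  · apply List.map_congr_left
    intro k hk
    simp only [Function.comp, PySem.List.pyGetD_natCast]
    apply List.map_congr_left
    intro v _
    exact target_eq inputs v k
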